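-- pv_equiv track=rewrite | github.com/hikiyamamatsurika/horse-bet-lab | src/horse_bet_lab/evaluation/wide_research_diff.py | find_decimal_values
-- ===== SOURCE A (Python) =====
-- def find_decimal_values(body: str) -> list[str]:
--     values: list[str] = []
--     current = ""
--     for char in body:
--         if char.isdigit() or char == ".":
--             current += char
--         elif current:
--             if current.count(".") == 1:
--                 values.append(current)
--             current = ""
--     if current and current.count(".") == 1:
--         values.append(current)
--     return values
-- ===== SOURCE B (Python) =====
-- def find_decimal_values(body: str) -> list[str]:
--     values: list[str] = []
--     i, n = 0, len(body)
--     while i < n: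
--         if body[i].isdigit() or body[i] == ".":
--             j = i + 1
--             while j < n and (body[j].isdigit() or body[j] == "."):
--                 j += 1
--             token = body[i:j]
--             if token.count(".") == 1:
--                 values.append(token)
--             i = j
--         else:
--             i += 1
--     return values
-- ===== Notes on version B (the rewrite author's own statement) =====
-- stated objective: alternative
-- what changed: Replaced the char-by-char accumulator/flush state machine with an index-based scan that extracts each maximal digit/dot run in one slice and filters it by dot count.
import Mathlib
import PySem

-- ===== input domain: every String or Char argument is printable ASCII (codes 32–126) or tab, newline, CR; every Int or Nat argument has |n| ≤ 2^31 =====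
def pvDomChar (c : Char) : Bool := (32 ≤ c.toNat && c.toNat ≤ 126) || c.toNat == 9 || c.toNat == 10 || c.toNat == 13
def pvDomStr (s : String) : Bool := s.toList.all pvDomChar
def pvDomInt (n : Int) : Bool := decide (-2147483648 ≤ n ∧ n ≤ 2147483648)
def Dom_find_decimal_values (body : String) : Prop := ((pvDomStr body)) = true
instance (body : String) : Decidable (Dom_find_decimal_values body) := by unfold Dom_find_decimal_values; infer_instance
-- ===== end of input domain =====

-- B replaces A's accumulator/flush state machine by an index-based scan extracting maximal digit/dot runs; alternative decomposition, same cost.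


-- ===== PORT A =====
-- char.isdigit() or char == "."
def pvP (c : Char) : Bool := PySem.Chars.isdigit c || c == '.'

-- A's loop: state = current (list of chars so far); emits tokens in order.
def pvAgo (cur : List Char) : List Char → List String
  | [] => if cur ≠ [] ∧ cur.count '.' = 1 then [String.mk cur] else []
  | c :: cs =>
      if pvP c then pvAgo (cur ++ [c]) cs
      else if cur ≠ [] then
        (if cur.count '.' = 1 then [String.mk cur] else []) ++ pvAgo [] cs
      else pvAgo cur cs

def find_decimal_values (body : String) : List String := pvAgo [] body.toList

-- ===== PORT B =====
-- B's scan: at a digit/dot char take the maximal run (the inner while loop = takeWhile/dropWhile), filter by dot count.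
def pvBgo : List Char → List String
  | [] => []
  | c :: cs =>
      if pvP c then
        (if (c :: List.takeWhile pvP cs).count '.' = 1
         then [String.mk (c :: List.takeWhile pvP cs)] else []) ++
        pvBgo (List.dropWhile pvP cs)
      else pvBgo cs
termination_by cs => cs.length
decreasing_by
  · exact Nat.lt_succ_of_le (List.length_dropWhile_le _ _)
  · simp

def find_decimal_values_alt (body : String) : List String := pvBgo body.toList

-- ===== PRECONDITION & SPEC =====
def Spec_find_decimal_values (body : String) (out : List String) : Prop := out = find_decimal_values_alt body
instance (body : String) (out : List String) : Decidable (Spec_find_decimal_values body out) := by unfold Spec_find_decimal_values; infer_instance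

-- ===== CLAIM (what is proved, stated in full; the proofs are below) =====
def Claim_equal_find_decimal_values : Prop := ∀ (body : String), Dom_find_decimal_values body → Spec_find_decimal_values body (find_decimal_values body)

-- ===== LEMMAS AND PROOFS =====

-- token emitted for a (possibly empty) run
def pvE (t : List Char) : List String := if t.count '.' = 1 then [String.mk t] else []

lemma pvBgo_split (cs : List Char) :
    pvBgo cs = pvE (List.takeWhile pvP cs) ++ pvBgo (List.dropWhile pvP cs) := by
  cases cs with
  | nil => simp [pvBgo, pvE]
  | cons c cs =>
      by_cases h : pvP c = true
      · simp [pvBgo, h, List.takeWhile_cons, List.dropWhile_cons, pvE]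
      · simp [pvBgo, h, List.takeWhile_cons, List.dropWhile_cons, pvE]

lemma pvAgo_eq (cs : List Char) : ∀ cur,
    pvAgo cur cs = pvE (cur ++ List.takeWhile pvP cs) ++ pvBgo (List.dropWhile pvP cs) := by
  induction cs with
  | nil =>
      intro cur
      by_cases h : cur.count '.' = 1
      · have hne : cur ≠ [] := by
          intro he; subst he; simp at h
        simp [pvAgo, pvBgo, pvE, h, hne]
      · simp [pvAgo, pvBgo, pvE, h]
  | cons c cs ih =>
      intro cur
      by_cases h : pvP c = true
      · simp only [pvAgo, h, if_pos, List.takeWhile_cons, List.dropWhile_cons]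
        rw [ih (cur ++ [c])]
        simp [List.append_assoc]
      · have hstep : pvAgo cur (c :: cs) = pvE cur ++ pvAgo [] cs := by
          by_cases hc : cur = []
          · subst hc
            simp [pvAgo, h, pvE]
          · simp [pvAgo, h, hc, pvE]
        rw [hstep, ih [], List.nil_append, ← pvBgo_split]
        simp [List.takeWhile_cons, List.dropWhile_cons, h, pvBgo]

-- ===== VERDICT (by name: the statement is the Claim_ definition above) =====
theorem find_decimal_values_spec : Claim_equal_find_decimal_values := by
  intro body _
  show find_decimal_values body = find_decimal_values_alt body
  unfold find_decimal_values find_decimal_values_alt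
  rw [pvAgo_eq, List.nil_append, ← pvBgo_split]
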